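-- pv_equiv track=rewrite | github.com/MrWrynn/TutorialPython | dasdasdas.py | divida_aux
-- ===== SOURCE A (Python) =====
-- def divida_aux(dig, num, nMenores, nMayores, resultadoMenor, resultadoMayor):
--     if (num==0):
--         return resultadoMenor, resultadoMayor
--     else:
--         digito=num%10
--         if (digito <= dig):
--             return divida_aux(dig, num // 10, nMenores + 1, nMayores, digito*10**nMenores + resultadoMenor, resultadoMayor)
--         else:
--             return divida_aux(dig, num//10, nMenores, nMayores+1, resultadoMenor, resultadoMayor + digito*10**nMayores)
-- ===== SOURCE B (Python) =====
-- def _digits(n):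
--     # least-significant-first digits of a non-negative integer; [] for 0
--     ds = []
--     while n:
--         ds.append(n % 10)
--         n //= 10
--     return ds
--
-- def _val(ds):
--     # rebuild the number whose LSB-first digits are ds (Horner, MSB first)
--     v = 0
--     for d in reversed(ds):
--         v = v * 10 + d
--     return v
--
-- def _place(acc, ds, n):
--     # add the rebuilt digits, shifted n decimal places, onto the accumulator;
--     # an empty side contributes nothing (no shift computed)
--     return acc + _val(ds) * 10 ** n if ds else acc
--
-- def divida_aux(dig, num, nMenores, nMayores, resultadoMenor, resultadoMayor):
--     ds = _digits(num)
--     lo = [d for d in ds if d <= dig]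
--     hi = [d for d in ds if d > dig]
--     return _place(resultadoMenor, lo, nMenores), _place(resultadoMayor, hi, nMayores)
-- ===== Notes on version B (the rewrite author's own statement) =====
-- stated objective: faster
-- what changed: Replaces the four-accumulator tail recursion by a three-phase decomposition (extract the digit list once, partition by the threshold, Horner-rebuild each part and shift it onto its accumulator with a single power of ten), avoiding the fresh 10**counter big-int power A computes at every digit.
-- outside the precondition, e.g. on divida_aux(5, 23, -1, 0, 0, 0): A returns (2.3, 0), B returns (2.3000000000000003, 0)
import Mathlib
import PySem

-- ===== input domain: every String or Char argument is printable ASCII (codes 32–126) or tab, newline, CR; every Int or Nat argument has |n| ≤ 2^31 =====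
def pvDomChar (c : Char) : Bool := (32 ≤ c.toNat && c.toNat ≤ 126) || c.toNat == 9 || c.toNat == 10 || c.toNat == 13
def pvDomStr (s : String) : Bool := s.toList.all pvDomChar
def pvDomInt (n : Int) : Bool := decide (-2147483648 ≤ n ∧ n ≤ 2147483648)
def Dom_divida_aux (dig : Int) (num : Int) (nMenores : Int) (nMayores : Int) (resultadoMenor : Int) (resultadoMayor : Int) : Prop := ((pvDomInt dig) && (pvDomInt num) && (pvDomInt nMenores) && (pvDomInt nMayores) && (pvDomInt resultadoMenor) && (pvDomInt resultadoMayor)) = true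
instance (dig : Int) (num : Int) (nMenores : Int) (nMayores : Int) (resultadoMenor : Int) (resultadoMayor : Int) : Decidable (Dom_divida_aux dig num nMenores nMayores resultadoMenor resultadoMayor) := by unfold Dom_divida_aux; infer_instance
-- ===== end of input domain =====

-- B decomposes the task into digit extraction, partition and Horner rebuild; equivalence proved on num >= 0 with non-negative counters.
-- ===== PORT A =====
-- Python's recursion never terminates for num < 0 (num//10 stays -1); the 'num < 0' branch only
-- makes the Lean function total and lies outside Pre_divida_aux.
def divida_aux (dig : Int) (num : Int) (nMenores : Int) (nMayores : Int) (resultadoMenor : Int) (resultadoMayor : Int) : Int × Int :=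
  if num = 0 then (resultadoMenor, resultadoMayor)
  else if num < 0 then (0, 0)
  else
    let digito := PySem.Int.mod num 10
    if digito ≤ dig then
      divida_aux dig (PySem.Int.floordiv num 10) (nMenores + 1) nMayores (digito * 10 ^ nMenores.toNat + resultadoMenor) resultadoMayor
    else
      divida_aux dig (PySem.Int.floordiv num 10) nMenores (nMayores + 1) resultadoMenor (resultadoMayor + digito * 10 ^ nMayores.toNat)
  termination_by num.toNat
  decreasing_by
    all_goals
      rw [PySem.Int.floordiv_eq_ediv_of_pos (by norm_num)]
      omega

-- ===== PORT B =====
-- least-significant-first digits of a non-negative integer; [] for 0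
-- (the 'n < 0' branch only makes it total: Python's while loop diverges there, outside Pre_)
def pvDigits (n : Int) : List Int :=
  if n = 0 then []
  else if n < 0 then []
  else PySem.Int.mod n 10 :: pvDigits (PySem.Int.floordiv n 10)
  termination_by n.toNat
  decreasing_by
    rw [PySem.Int.floordiv_eq_ediv_of_pos (by norm_num)]
    omega

-- Horner rebuild of the number whose LSB-first digits are ds
def pvVal (ds : List Int) : Int :=
  ds.reverse.foldl (fun v d => v * 10 + d) 0

-- add the rebuilt digits, shifted n decimal places, onto the accumulator; nothing for an empty side
def pvPlace (acc : Int) (ds : List Int) (n : Int) : Int :=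
  if ds = [] then acc else acc + pvVal ds * 10 ^ n.toNat

def divida_aux_alt (dig : Int) (num : Int) (nMenores : Int) (nMayores : Int) (resultadoMenor : Int) (resultadoMayor : Int) : Int × Int :=
  let ds := pvDigits num
  let lo := ds.filter (fun d => d ≤ dig)
  let hi := ds.filter (fun d => dig < d)
  (pvPlace resultadoMenor lo nMenores, pvPlace resultadoMayor hi nMayores)

-- ===== PRECONDITION & SPEC =====
-- Pre_ excludes num < 0, on which A's recursion raises RecursionError (num//10 never reaches 0),
-- and a negative digit-position counter unless its side certainly receives no digit (num = 0,
-- or dig < 0 for the low side, or 9 ≤ dig for the high side): there Python's 10**n is a float,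
-- so A can return a non-int value.
def Pre_divida_aux (dig : Int) (num : Int) (nMenores : Int) (nMayores : Int) (resultadoMenor : Int) (resultadoMayor : Int) : Prop :=
  0 ≤ num ∧ (0 ≤ nMenores ∨ num = 0 ∨ dig < 0) ∧ (0 ≤ nMayores ∨ num = 0 ∨ 9 ≤ dig)
instance (dig : Int) (num : Int) (nMenores : Int) (nMayores : Int) (resultadoMenor : Int) (resultadoMayor : Int) : Decidable (Pre_divida_aux dig num nMenores nMayores resultadoMenor resultadoMayor) := by unfold Pre_divida_aux; infer_instance
def pvWitness_divida_aux : Int × Int × Int × Int × Int × Int := (4, 9073, 0, 0, 0, 0)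

def Spec_divida_aux (dig : Int) (num : Int) (nMenores : Int) (nMayores : Int) (resultadoMenor : Int) (resultadoMayor : Int) (out : Int × Int) : Prop := out = divida_aux_alt dig num nMenores nMayores resultadoMenor resultadoMayor
instance (dig : Int) (num : Int) (nMenores : Int) (nMayores : Int) (resultadoMenor : Int) (resultadoMayor : Int) (out : Int × Int) : Decidable (Spec_divida_aux dig num nMenores nMayores resultadoMenor resultadoMayor out) := by unfold Spec_divida_aux; infer_instance

-- ===== CLAIM (what is proved, stated in full; the proofs are below) =====
def Claim_equal_divida_aux : Prop := ∀ (dig : Int) (num : Int) (nMenores : Int) (nMayores : Int) (resultadoMenor : Int) (resultadoMayor : Int), Dom_divida_aux dig num nMenores nMayores resultadoMenor resultadoMayor → Pre_divida_aux dig num nMenores nMayores resultadoMenor resultadoMayor → Spec_divida_aux dig num nMenores nMayores resultadoMenor resultadoMayor (divida_aux dig num nMenores nMayores resultadoMenor resultadoMayor)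

-- ===== LEMMAS AND PROOFS =====
theorem pvDigits_pos (n : Int) (h0 : ¬ n = 0) (hneg : ¬ n < 0) :
    pvDigits n = PySem.Int.mod n 10 :: pvDigits (PySem.Int.floordiv n 10) := by
  rw [pvDigits]; simp [h0, hneg]

theorem pvVal_cons (d : Int) (ds : List Int) : pvVal (d :: ds) = pvVal ds * 10 + d := by
  simp [pvVal, List.foldl_append]

theorem divida_aux_eq_alt (dig num nMenores nMayores resultadoMenor resultadoMayor : Int)
    (hnum : 0 ≤ num) (hm : 0 ≤ nMenores ∨ num = 0 ∨ dig < 0)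
    (hM : 0 ≤ nMayores ∨ num = 0 ∨ 9 ≤ dig) :
    divida_aux dig num nMenores nMayores resultadoMenor resultadoMayor =
      divida_aux_alt dig num nMenores nMayores resultadoMenor resultadoMayor := by
  induction num, nMenores, nMayores, resultadoMenor, resultadoMayor using divida_aux.induct dig with
  | case1 nMenores nMayores resultadoMenor resultadoMayor =>
      simp [divida_aux, divida_aux_alt, pvDigits, pvPlace]
  | case2 num nMenores nMayores resultadoMenor resultadoMayor h0 hneg =>
      omega
  | case3 num nMenores nMayores resultadoMenor resultadoMayor h0 hneg digito hd ih =>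
      have hd' : PySem.Int.mod num 10 ≤ dig := hd
      have hdg : digito = PySem.Int.mod num 10 := rfl
      rw [hdg] at ih
      have hdiv : 0 ≤ PySem.Int.floordiv num 10 := by
        rw [PySem.Int.floordiv_eq_ediv_of_pos (by norm_num)]; omega
      have hmod : 0 ≤ PySem.Int.mod num 10 ∧ PySem.Int.mod num 10 < 10 := by
        rw [PySem.Int.mod_eq_emod_of_pos (by norm_num)]; omega
      have hm0 : 0 ≤ nMenores := by
        rcases hm with h | h | h
        · exact h
        · omega
        · omega
      have hM' : 0 ≤ nMayores ∨ PySem.Int.floordiv num 10 = 0 ∨ 9 ≤ dig := by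
        rcases hM with h | h | h
        · exact Or.inl h
        · omega
        · exact Or.inr (Or.inr h)
      have ht : (nMenores + 1).toNat = nMenores.toNat + 1 := by omega
      rw [divida_aux, if_neg h0, if_neg hneg, if_pos hd', ih hdiv (Or.inl (by omega)) hM']
      unfold divida_aux_alt
      rw [pvDigits_pos num h0 hneg]
      simp only [List.filter_cons, decide_eq_true_eq, if_pos hd',
        if_neg (not_lt.mpr hd')]
      refine Prod.ext ?_ rfl
      by_cases hlo : (pvDigits (PySem.Int.floordiv num 10)).filter (fun d => decide (d ≤ dig)) = []
      · simp only [pvPlace]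
        rw [if_pos hlo, if_neg (List.cons_ne_nil _ _), hlo, pvVal_cons]
        simp only [pvVal, List.reverse_nil, List.foldl_nil]
        ring
      · simp only [pvPlace]
        rw [if_neg hlo, if_neg (List.cons_ne_nil _ _), pvVal_cons, ht]
        ring
  | case4 num nMenores nMayores resultadoMenor resultadoMayor h0 hneg digito hd ih =>
      have hd' : ¬ PySem.Int.mod num 10 ≤ dig := hd
      have hdg : digito = PySem.Int.mod num 10 := rfl
      rw [hdg] at ih
      have hdiv : 0 ≤ PySem.Int.floordiv num 10 := by
        rw [PySem.Int.floordiv_eq_ediv_of_pos (by norm_num)]; omega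
      have hmod : 0 ≤ PySem.Int.mod num 10 ∧ PySem.Int.mod num 10 < 10 := by
        rw [PySem.Int.mod_eq_emod_of_pos (by norm_num)]; omega
      have hM0 : 0 ≤ nMayores := by
        rcases hM with h | h | h
        · exact h
        · omega
        · omega
      have hm' : 0 ≤ nMenores ∨ PySem.Int.floordiv num 10 = 0 ∨ dig < 0 := by
        rcases hm with h | h | h
        · exact Or.inl h
        · omega
        · exact Or.inr (Or.inr h)
      have ht : (nMayores + 1).toNat = nMayores.toNat + 1 := by omega
      rw [divida_aux, if_neg h0, if_neg hneg, if_neg hd', ih hdiv hm' (Or.inl (by omega))]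
      unfold divida_aux_alt
      rw [pvDigits_pos num h0 hneg]
      simp only [List.filter_cons, decide_eq_true_eq, if_neg hd',
        if_pos (not_le.mp hd')]
      refine Prod.ext rfl ?_
      by_cases hhi : (pvDigits (PySem.Int.floordiv num 10)).filter (fun d => decide (dig < d)) = []
      · simp only [pvPlace]
        rw [if_pos hhi, if_neg (List.cons_ne_nil _ _), hhi, pvVal_cons]
        simp only [pvVal, List.reverse_nil, List.foldl_nil]
        ring
      · simp only [pvPlace]
        rw [if_neg hhi, if_neg (List.cons_ne_nil _ _), pvVal_cons, ht]
        ring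

-- ===== VERDICT (by name: the statement is the Claim_ definition above) =====
theorem divida_aux_spec : Claim_equal_divida_aux := by
  intro dig num nMenores nMayores rMen rMay _ hpre
  exact divida_aux_eq_alt dig num nMenores nMayores rMen rMay hpre.1 hpre.2.1 hpre.2.2
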